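-- pv_equiv track=rewrite | github.com/ucla-mobility/MDrive | tools/measure_failure_metrics.py | _build_outermost_map
-- ===== SOURCE A (Python) =====
-- from typing import Dict, List, Optional, Tuple, Set
--
-- def _safe_int(v, default=0) -> int:
--     try:
--         if v is None: return int(default)
--         return int(v)
--     except Exception:
--         return int(default)
--
-- def _build_outermost_map(carla_feats: Dict[int, Dict]) -> Dict[int, bool]:
--     """Build topology-based outermost map: is each CARLA line on the outermost lane of its road?"""
--     road_side_max_abs_lane: Dict[Tuple[int, int], int] = {}
--     line_road_id: Dict[int, int] = {}
--     line_lane_id: Dict[int, int] = {}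
--
--     for ci, row in carla_feats.items():
--         if not isinstance(row, dict):
--             continue
--         rid = _safe_int(row.get("road_id"), 0)
--         lid = _safe_int(row.get("lane_id"), 0)
--         line_road_id[ci] = rid
--         line_lane_id[ci] = lid
--         if lid == 0:
--             continue
--         side = 1 if lid > 0 else -1
--         key = (rid, side)
--         cur = road_side_max_abs_lane.get(key, 0)
--         if abs(lid) > cur:
--             road_side_max_abs_lane[key] = abs(lid)
--
--     outermost: Dict[int, bool] = {}
--     for ci, rid in line_road_id.items():
--         lid = line_lane_id.get(ci, 0)
--         if lid == 0:
--             outermost[ci] = False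
--             continue
--         side = 1 if lid > 0 else -1
--         max_abs = road_side_max_abs_lane.get((rid, side), abs(lid))
--         outermost[ci] = bool(abs(lid) >= max_abs)
--     return outermost
-- ===== SOURCE B (Python) =====
-- def _safe_int(v, default=0) -> int:
--     try:
--         if v is None: return int(default)
--         return int(v)
--     except Exception:
--         return int(default)
--
-- def _build_outermost_map(carla_feats):
--     """Per line: outermost iff its |lane_id| attains the max |lane_id| among lines
--     sharing its (road_id, side) — computed by a direct scan, no max-table."""
--     feats = [(ci, _safe_int(row.get("road_id"), 0), _safe_int(row.get("lane_id"), 0))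
--              for ci, row in carla_feats.items() if isinstance(row, dict)]
--
--     def side(l):
--         return 1 if l > 0 else -1
--
--     return {ci: lid != 0 and abs(lid) >= max(abs(l2) for _, r2, l2 in feats
--                                              if l2 != 0 and r2 == rid and side(l2) == side(lid))
--             for ci, rid, lid in feats}
-- ===== Notes on version B (the rewrite author's own statement) =====
-- stated objective: simpler
-- what changed: B drops A's three bookkeeping dicts (max-table keyed by (road_id, side) plus road-id and lane-id maps rebuilt in a second pass) and emits the result as one dict comprehension whose value compares |lane_id| against a direct scan for its (road_id, side) group maximum.
import Mathlib
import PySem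

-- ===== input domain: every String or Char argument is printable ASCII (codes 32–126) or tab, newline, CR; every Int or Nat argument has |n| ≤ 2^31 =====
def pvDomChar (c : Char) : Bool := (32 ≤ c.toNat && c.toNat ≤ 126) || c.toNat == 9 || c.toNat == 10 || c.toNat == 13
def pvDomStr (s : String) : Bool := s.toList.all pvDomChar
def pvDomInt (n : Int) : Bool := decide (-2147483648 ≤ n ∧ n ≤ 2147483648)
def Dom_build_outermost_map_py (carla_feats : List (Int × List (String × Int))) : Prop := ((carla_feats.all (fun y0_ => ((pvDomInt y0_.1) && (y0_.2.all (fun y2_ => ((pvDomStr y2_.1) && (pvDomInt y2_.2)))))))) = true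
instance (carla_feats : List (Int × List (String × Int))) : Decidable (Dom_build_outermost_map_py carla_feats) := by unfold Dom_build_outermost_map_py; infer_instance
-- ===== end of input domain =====

-- B replaces A's max-table + second lookup pass by a single dict comprehension whose value is a
-- direct scan for the group maximum (objective: simpler; not faster).

-- shared helper: _safe_int(row.get(name), 0) — row.get is first-match lookup on the assoc list;
-- _safe_int of an int is the int itself, of None (missing key) it is 0
def pvField (row : List (String × Int)) (name : String) : Int :=
  ((PySem.Dict.mk row).get? name).getD 0

-- ===== PORT A =====
-- body of A's first loop: updates (road_side_max_abs_lane, line_road_id, line_lane_id)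
def pvStepA (st : PySem.Dict (Int × Int) Int × PySem.Dict Int Int × PySem.Dict Int Int)
    (p : Int × List (String × Int)) :
    PySem.Dict (Int × Int) Int × PySem.Dict Int Int × PySem.Dict Int Int :=
  let ms := st.1
  let ci := p.1
  let rid := pvField p.2 "road_id"
  let lid := pvField p.2 "lane_id"
  let lrid := st.2.1.insert ci rid
  let llid := st.2.2.insert ci lid
  if lid = 0 then (ms, lrid, llid)
  else
    let side : Int := if lid > 0 then 1 else -1
    let cur := ms.getD (rid, side) 0
    if |lid| > cur then (ms.insert (rid, side) |lid|, lrid, llid)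
    else (ms, lrid, llid)

-- body of A's second loop: for ci, rid in line_road_id.items()
def pvOutStepA (ms : PySem.Dict (Int × Int) Int) (llid : PySem.Dict Int Int)
    (out : PySem.Dict Int Bool) (q : Int × Int) : PySem.Dict Int Bool :=
  let ci := q.1
  let lid := llid.getD ci 0
  if lid = 0 then out.insert ci false
  else
    let side : Int := if lid > 0 then 1 else -1
    let maxAbs := ms.getD (q.2, side) |lid|
    out.insert ci (decide (|lid| ≥ maxAbs))

def build_outermost_map_py (carla_feats : List (Int × List (String × Int))) : List (Int × Bool) :=
  let st := carla_feats.foldl pvStepA (PySem.Dict.empty, PySem.Dict.empty, PySem.Dict.empty)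
  (st.2.1.items.foldl (pvOutStepA st.1 st.2.2) PySem.Dict.empty).items

-- ===== PORT B =====
-- side(l) helper of Source B
def pvSide (l : Int) : Int := if l > 0 then 1 else -1

-- the inner generator's max: max(abs(l2) for _, r2, l2 in feats if l2 != 0 and r2 == rid and side(l2) == side(lid));
-- the scanned group always contains the line itself, so the list is nonempty and `.getD 0` never supplies the default
def pvGroupMax (feats : List (Int × Int × Int)) (rid lid : Int) : Int :=
  ((PySem.List.max? ((feats.filter (fun t : Int × Int × Int => t.2.2 ≠ 0 ∧ t.2.1 = rid ∧ pvSide t.2.2 = pvSide lid)).map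
      (fun t : Int × Int × Int => |t.2.2|)) (fun x => x)).getD 0)

-- value of Source B's dict comprehension at one entry (ci, rid, lid)
def pvValB (feats : List (Int × Int × Int)) (t : Int × Int × Int) : Bool :=
  if t.2.2 = 0 then false else decide (|t.2.2| ≥ pvGroupMax feats t.2.1 t.2.2)

def build_outermost_map_py_alt (carla_feats : List (Int × List (String × Int))) : List (Int × Bool) :=
  let feats := carla_feats.map (fun p => (p.1, pvField p.2 "road_id", pvField p.2 "lane_id"))
  -- dict comprehension: insert (ci, value) in order (overwrite keeps first position)
  (feats.foldl (fun (d : PySem.Dict Int Bool) t => d.insert t.1 (pvValB feats t)) PySem.Dict.empty).items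

-- ===== PRECONDITION & SPEC =====
-- Pre_ excludes association lists with duplicate outer keys: they cannot arise from A's Python
-- dict parameter (dict keys are unique), so their assoc-list reading is an ambiguous corner.
def Pre_build_outermost_map_py (carla_feats : List (Int × List (String × Int))) : Prop :=
  (carla_feats.map Prod.fst).Nodup
instance (carla_feats : List (Int × List (String × Int))) : Decidable (Pre_build_outermost_map_py carla_feats) := by unfold Pre_build_outermost_map_py; infer_instance

def pvWitness_build_outermost_map_py : (List (Int × List (String × Int))) :=
  [(3, [("road_id", 1), ("lane_id", -2)]), (4, [("road_id", 1), ("lane_id", -1)]),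
   (5, [("road_id", 1), ("lane_id", 1)]), (6, [("lane_id", 0)]), (7, [])]

def Spec_build_outermost_map_py (carla_feats : List (Int × List (String × Int))) (out : List (Int × Bool)) : Prop := out = build_outermost_map_py_alt carla_feats
instance (carla_feats : List (Int × List (String × Int))) (out : List (Int × Bool)) : Decidable (Spec_build_outermost_map_py carla_feats out) := by unfold Spec_build_outermost_map_py; infer_instance

-- ===== CLAIM (what is proved, stated in full; the proofs are below) =====
def Claim_equal_build_outermost_map_py : Prop := ∀ (carla_feats : List (Int × List (String × Int))), Dom_build_outermost_map_py carla_feats → Pre_build_outermost_map_py carla_feats → Spec_build_outermost_map_py carla_feats (build_outermost_map_py carla_feats)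

-- ===== LEMMAS AND PROOFS =====

-- abbreviations for one entry's fields
def pvRid (p : Int × List (String × Int)) : Int := pvField p.2 "road_id"
def pvLid (p : Int × List (String × Int)) : Int := pvField p.2 "lane_id"
def pvFeat (p : Int × List (String × Int)) : Int × Int × Int := (p.1, pvRid p, pvLid p)

-- the |lane_id| contributions of one (road_id, side) group, in list order
def pvContribs (cf : List (Int × List (String × Int))) (k : Int × Int) : List Int :=
  (cf.filter (fun p => pvLid p ≠ 0 ∧ (pvRid p, pvSide (pvLid p)) = k)).map (fun p => |pvLid p|)

-- A's running max with strict > (the max-table update)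
def pvRunMax (xs : List Int) (a : Int) : Int := xs.foldl (fun a v => if v > a then v else a) a

-- the max-table component of A's first loop, in isolation
def pvMsStep (ms : PySem.Dict (Int × Int) Int) (p : Int × List (String × Int)) : PySem.Dict (Int × Int) Int :=
  if pvLid p = 0 then ms
  else if |pvLid p| > ms.getD (pvRid p, pvSide (pvLid p)) 0 then ms.insert (pvRid p, pvSide (pvLid p)) |pvLid p| else ms

theorem pvStepA_fst (cf : List (Int × List (String × Int)))
    (ms : PySem.Dict (Int × Int) Int) (lr ll : PySem.Dict Int Int) :
    (cf.foldl pvStepA (ms, lr, ll)).1 = cf.foldl pvMsStep ms := by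
  induction cf generalizing ms lr ll with
  | nil => rfl
  | cons p t ih =>
    simp only [List.foldl_cons]
    rw [show pvStepA (ms, lr, ll) p = (pvMsStep ms p, (ms, lr, ll).2.1.insert p.1 (pvRid p), (ms, lr, ll).2.2.insert p.1 (pvLid p)) from ?_, ih]
    simp only [pvStepA, pvMsStep, pvRid, pvLid, pvSide]
    split_ifs <;> rfl

theorem pvStepA_lrid (cf : List (Int × List (String × Int)))
    (ms : PySem.Dict (Int × Int) Int) (lr ll : PySem.Dict Int Int) :
    (cf.foldl pvStepA (ms, lr, ll)).2.1 = cf.foldl (fun d p => d.insert p.1 (pvRid p)) lr := by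
  induction cf generalizing ms lr ll with
  | nil => rfl
  | cons p t ih =>
    simp only [List.foldl_cons]
    rw [show pvStepA (ms, lr, ll) p = (pvMsStep ms p, (ms, lr, ll).2.1.insert p.1 (pvRid p), (ms, lr, ll).2.2.insert p.1 (pvLid p)) from ?_, ih]
    simp only [pvStepA, pvMsStep, pvRid, pvLid, pvSide]
    split_ifs <;> rfl

theorem pvStepA_llid (cf : List (Int × List (String × Int)))
    (ms : PySem.Dict (Int × Int) Int) (lr ll : PySem.Dict Int Int) :
    (cf.foldl pvStepA (ms, lr, ll)).2.2 = cf.foldl (fun d p => d.insert p.1 (pvLid p)) ll := by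
  induction cf generalizing ms lr ll with
  | nil => rfl
  | cons p t ih =>
    simp only [List.foldl_cons]
    rw [show pvStepA (ms, lr, ll) p = (pvMsStep ms p, (ms, lr, ll).2.1.insert p.1 (pvRid p), (ms, lr, ll).2.2.insert p.1 (pvLid p)) from ?_, ih]
    simp only [pvStepA, pvMsStep, pvRid, pvLid, pvSide]
    split_ifs <;> rfl

theorem pvMs_get? (cf : List (Int × List (String × Int))) (ms : PySem.Dict (Int × Int) Int) (k : Int × Int) :
    (cf.foldl pvMsStep ms).get? k =
      (pvContribs cf k).foldl (fun (a : Option Int) v => if v > a.getD 0 then some v else a) (ms.get? k) := by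
  induction cf generalizing ms with
  | nil => rfl
  | cons p t ih =>
    simp only [List.foldl_cons, pvContribs, List.filter_cons]
    by_cases h0 : pvLid p = 0
    · simp only [pvContribs] at ih
      simpa [pvMsStep, h0] using ih ms
    · simp only [pvContribs] at ih
      by_cases hk : (pvRid p, pvSide (pvLid p)) = k
      · have hd : (decide (pvLid p ≠ 0 ∧ (pvRid p, pvSide (pvLid p)) = k)) = true := by
          simp [h0, hk]
        simp only [hd, if_true, List.map_cons, List.foldl_cons]
        rw [ih]
        congr 1
        simp only [pvMsStep, if_neg h0, hk, PySem.Dict.getD_eq_get?_getD]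
        split_ifs with hgt
        · exact PySem.Dict.get?_insert_self _ _ _
        · rfl
      · have hd : (decide (pvLid p ≠ 0 ∧ (pvRid p, pvSide (pvLid p)) = k)) = false := by
          simp [hk]
        simp only [hd, if_false, Bool.false_eq_true]
        rw [ih]
        congr 1
        simp only [pvMsStep, if_neg h0]
        split_ifs with hgt
        · exact PySem.Dict.get?_insert_of_ne _ _ (fun h => hk h.symm)
        · rfl

theorem pvOptFold (xs : List Int) (a : Int) :
    xs.foldl (fun (a : Option Int) v => if v > a.getD 0 then some v else a) (some a) = some (pvRunMax xs a) := by
  induction xs generalizing a with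
  | nil => rfl
  | cons v t ih =>
    simp only [List.foldl_cons, Option.getD_some, pvRunMax] at *
    split_ifs <;> exact ih _


-- A's per-line value, read off the max-table characterization
def pvValA (cf : List (Int × List (String × Int))) (p : Int × List (String × Int)) : Bool :=
  if pvLid p = 0 then false
  else decide (|pvLid p| ≥
    ((pvContribs cf (pvRid p, pvSide (pvLid p))).foldl
      (fun (a : Option Int) v => if v > a.getD 0 then some v else a) (none : Option Int)).getD |pvLid p|)

theorem pvContrib_pos (cf : List (Int × List (String × Int))) (k : Int × Int) :
    ∀ v ∈ pvContribs cf k, 0 < v := by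
  intro v hv
  simp only [pvContribs, List.mem_map, List.mem_filter, decide_eq_true_eq] at hv
  obtain ⟨q, ⟨-, hq0, -⟩, rfl⟩ := hv
  exact abs_pos.mpr hq0

theorem pvRunMax_eq_foldl_max (xs : List Int) (a : Int) : pvRunMax xs a = xs.foldl max a := by
  simp only [pvRunMax]
  congr 1
  funext a v
  rw [max_def]
  split_ifs <;> omega

theorem pvFeat_fst (cf : List (Int × List (String × Int))) :
    (cf.map pvFeat).map (fun t => t.1) = cf.map Prod.fst := by
  simp [List.map_map]
  exact fun a b _ => rfl

theorem pvB_eq_map (cf : List (Int × List (String × Int))) (h : (cf.map Prod.fst).Nodup) :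
    build_outermost_map_py_alt cf = cf.map (fun p => (p.1, pvValB (cf.map pvFeat) (pvFeat p))) := by
  show ((cf.map pvFeat).foldl (fun d t => d.insert t.1 (pvValB (cf.map pvFeat) t)) PySem.Dict.empty).items = _
  rw [PySem.Dict.items_foldl_insert_fresh (cf.map pvFeat) (fun t => t.1) (pvValB (cf.map pvFeat))
      PySem.Dict.empty (fun a _ => PySem.Dict.contains_empty _) (by rw [pvFeat_fst]; exact h)]
  simp [List.map_map]
  rfl

theorem pvA_eq_map (cf : List (Int × List (String × Int))) (h : (cf.map Prod.fst).Nodup) :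
    build_outermost_map_py cf = cf.map (fun p => (p.1, pvValA cf p)) := by
  have hrw : build_outermost_map_py cf
      = (((cf.foldl pvStepA (PySem.Dict.empty, PySem.Dict.empty, PySem.Dict.empty)).2.1.items).foldl
          (pvOutStepA (cf.foldl pvStepA (PySem.Dict.empty, PySem.Dict.empty, PySem.Dict.empty)).1
            (cf.foldl pvStepA (PySem.Dict.empty, PySem.Dict.empty, PySem.Dict.empty)).2.2)
          PySem.Dict.empty).items := rfl
  rw [hrw, pvStepA_fst, pvStepA_lrid, pvStepA_llid]
  have hlr : (cf.foldl (fun d p => d.insert p.1 (pvRid p)) PySem.Dict.empty).items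
      = cf.map (fun p => (p.1, pvRid p)) := by
    simpa using PySem.Dict.items_foldl_insert_fresh cf Prod.fst pvRid PySem.Dict.empty
      (fun a _ => PySem.Dict.contains_empty _) h
  have hll : (cf.foldl (fun d p => d.insert p.1 (pvLid p)) PySem.Dict.empty).items
      = cf.map (fun p => (p.1, pvLid p)) := by
    simpa using PySem.Dict.items_foldl_insert_fresh cf Prod.fst pvLid PySem.Dict.empty
      (fun a _ => PySem.Dict.contains_empty _) h
  have hllk : (cf.foldl (fun d p => d.insert p.1 (pvLid p)) PySem.Dict.empty).keys.Nodup := by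
    simp only [PySem.Dict.keys, hll, List.map_map]
    simpa using h
  have hget : ∀ p ∈ cf, (cf.foldl (fun d p => d.insert p.1 (pvLid p)) PySem.Dict.empty).get? p.1
      = some (pvLid p) := by
    intro p hp
    exact PySem.Dict.get?_of_mem_items _ (by rw [hll]; exact List.mem_map_of_mem hp) hllk
  rw [hlr, List.foldl_map]
  rw [PySem.List.foldl_congr_mem _ _ (fun out p => out.insert p.1 (pvValA cf p)) _ ?_]
  · rw [PySem.Dict.items_foldl_insert_fresh cf Prod.fst (pvValA cf) PySem.Dict.empty
      (fun a _ => PySem.Dict.contains_empty _) h]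
    simp
    rfl
  · intro out p hp
    simp only [pvOutStepA, PySem.Dict.getD_eq_get?_getD, hget p hp, Option.getD_some]
    by_cases h0 : pvLid p = 0
    · simp [pvValA, h0]
    · simp only [if_neg h0, pvValA]
      congr 1
      rw [pvMs_get?]
      simp [PySem.Dict.get?_empty, pvSide]

theorem pvVal_eq (cf : List (Int × List (String × Int))) (p : Int × List (String × Int)) (hp : p ∈ cf) :
    pvValA cf p = pvValB (cf.map pvFeat) (pvFeat p) := by
  by_cases h0 : pvLid p = 0
  · have h2 : (pvFeat p).2.2 = pvLid p := rfl
    simp [pvValA, pvValB, h2, h0]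
  · have hfilter : ((cf.map pvFeat).filter
        (fun t : Int × Int × Int => decide (t.2.2 ≠ 0 ∧ t.2.1 = pvRid p ∧ pvSide t.2.2 = pvSide (pvLid p))))
        = (cf.filter (fun q => decide (pvLid q ≠ 0 ∧ (pvRid q, pvSide (pvLid q)) = (pvRid p, pvSide (pvLid p))))).map pvFeat := by
      rw [List.filter_map]
      congr 1
      apply List.filter_congr
      intro q hq
      simp only [Function.comp_apply, pvFeat, decide_eq_decide, Prod.mk.injEq]
    have hcontr : ((cf.map pvFeat).filter
        (fun t : Int × Int × Int => decide (t.2.2 ≠ 0 ∧ t.2.1 = pvRid p ∧ pvSide t.2.2 = pvSide (pvLid p)))).map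
        (fun t : Int × Int × Int => |t.2.2|) = pvContribs cf (pvRid p, pvSide (pvLid p)) := by
      rw [hfilter, List.map_map]
      rfl
    have hmem : |pvLid p| ∈ pvContribs cf (pvRid p, pvSide (pvLid p)) := by
      simp only [pvContribs, List.mem_map]
      exact ⟨p, List.mem_filter.mpr ⟨hp, by simp [h0]⟩, rfl⟩
    obtain ⟨c, rest, hc⟩ : ∃ c rest, pvContribs cf (pvRid p, pvSide (pvLid p)) = c :: rest := by
      cases hx : pvContribs cf (pvRid p, pvSide (pvLid p)) with
      | nil => rw [hx] at hmem; cases hmem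
      | cons c rest => exact ⟨c, rest, rfl⟩
    have hcpos : 0 < c := pvContrib_pos cf _ c (hc ▸ List.mem_cons_self)
    have hA : pvValA cf p = decide (|pvLid p| ≥ rest.foldl max c) := by
      simp only [pvValA, if_neg h0, hc, List.foldl_cons, Option.getD_none]
      rw [if_pos hcpos, pvOptFold, Option.getD_some, pvRunMax_eq_foldl_max]
    have hB : pvValB (cf.map pvFeat) (pvFeat p) = decide (|pvLid p| ≥ rest.foldl max c) := by
      have h2 : (pvFeat p).2.2 = pvLid p := rfl
      simp only [pvValB, h2, if_neg h0, pvGroupMax]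
      rw [show (pvFeat p).2.1 = pvRid p from rfl, hcontr, hc, PySem.List.max?_id_cons, Option.getD_some]
    rw [hA, hB]

-- ===== VERDICT (by name: the statement is the Claim_ definition above) =====
theorem build_outermost_map_py_spec : Claim_equal_build_outermost_map_py := by
  intro cf _ hpre
  unfold Spec_build_outermost_map_py
  rw [pvA_eq_map cf hpre, pvB_eq_map cf hpre]
  exact List.map_congr_left (fun p hp => by rw [pvVal_eq cf p hp])
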